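-- pv_equiv track=rewrite | github.com/ttoino/advent-of-code | 2015/day06.py | part2
-- ===== SOURCE A (Python) =====
-- def part2(inp: list[tuple[str, int, int, int, int]]):
--     a = [0 for i in range(1000 * 1000)]
--
--     for action, sx, sy, ex, ey in inp:
--         for x in range(sx, ex + 1):
--             for y in range(sy, ey + 1):
--                 match action:
--                     case "on":
--                         a[x + y * 1000] += 1
--                     case "off":
--                         a[x + y * 1000] = max(a[x + y * 1000] - 1, 0)
--                     case "toggle":
--                         a[x + y * 1000] += 2
--
--     return sum(a)
-- ===== SOURCE B (Python) =====
-- def part2(inp: list[tuple[str, int, int, int, int]]):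
--     # Coordinate compression: replay the ordered ops once per uniform region, weight by area.
--     xs = sorted({0, 1000} | {v for _, sx, _, ex, _ in inp for v in (sx, ex + 1) if 0 < v < 1000})
--     ys = sorted({0, 1000} | {v for _, _, sy, _, ey in inp for v in (sy, ey + 1) if 0 < v < 1000})
--     total = 0
--     for x, x2 in zip(xs, xs[1:]):
--         col = [(action, sy, ey) for action, sx, sy, ex, ey in inp if sx <= x <= ex]
--         for y, y2 in zip(ys, ys[1:]):
--             v = 0
--             for action, sy, ey in col:
--                 if sy <= y <= ey:
--                     if action == "on":
--                         v += 1
--                     elif action == "off":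
--                         v = max(v - 1, 0)
--                     elif action == "toggle":
--                         v += 2
--             total += (x2 - x) * (y2 - y) * v
--     return total
-- ===== Notes on version B (the rewrite author's own statement) =====
-- stated objective: alternative
-- what changed: A sweeps every cell of the 10^6-cell grid per instruction and then sums the whole array; B compresses the coordinates into the O(I^2) rectangular regions on which the instruction sequence is uniform, replays the ordered instructions once per region, and weights each region's brightness by its area.
-- outside the precondition, e.g. on part2([('on', 999, 999, 999, 999), ('off', -1, 0, -1, 0)]): A returns 0, B returns 1; on part2([('on', -1, 0, -1, 0)]): A returns 1, B returns 0; on part2([('on', 0, 0, 0, 1200)]): A raises IndexError, B returns 1000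
import Mathlib
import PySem

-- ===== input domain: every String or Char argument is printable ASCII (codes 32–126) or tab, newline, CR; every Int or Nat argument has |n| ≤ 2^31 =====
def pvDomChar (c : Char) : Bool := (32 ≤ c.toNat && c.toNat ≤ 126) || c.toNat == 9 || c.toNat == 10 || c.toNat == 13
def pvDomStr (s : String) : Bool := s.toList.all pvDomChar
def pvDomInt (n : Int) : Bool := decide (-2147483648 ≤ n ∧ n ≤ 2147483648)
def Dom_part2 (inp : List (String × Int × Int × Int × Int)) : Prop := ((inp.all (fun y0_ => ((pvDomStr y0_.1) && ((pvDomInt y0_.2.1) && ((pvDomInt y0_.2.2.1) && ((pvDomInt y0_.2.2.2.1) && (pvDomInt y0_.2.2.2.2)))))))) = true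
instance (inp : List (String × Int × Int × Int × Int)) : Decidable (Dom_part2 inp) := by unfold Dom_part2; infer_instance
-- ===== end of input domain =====

-- B replaces A's per-cell sweep of the full 10^6-cell grid by coordinate compression: the ordered
-- ops are replayed once per uniform rectangular region and weighted by the region's area
-- (objective: alternative — a different
-- algorithm of comparable measured cost: region replay instead of a per-cell sweep).

-- ===== PORT A =====
-- a[i] = f(a[i]) with Python list-index semantics (negative index counts from the end;
-- out-of-range = IndexError, excluded by Pre_, leaves the array unchanged here).
def pyIdxUpd (a : Array Int) (i : Int) (f : Int → Int) : Array Int :=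
  let j : Int := if i < 0 then i + a.size else i
  if h : 0 ≤ j ∧ j.toNat < a.size then a.set j.toNat (f a[j.toNat]) else a

def part2 (inp : List (String × Int × Int × Int × Int)) : Int :=
  let a : Array Int := Array.replicate (1000 * 1000) 0
  let a := inp.foldl (fun a op =>
    match op with
    | (action, sx, sy, ex, ey) =>
      (PySem.List.pyRange sx (ex + 1) 1).foldl (fun a x =>
        (PySem.List.pyRange sy (ey + 1) 1).foldl (fun a y =>
          if action == "on" then pyIdxUpd a (x + y * 1000) (fun v => v + 1)
          else if action == "off" then pyIdxUpd a (x + y * 1000) (fun v => max (v - 1) 0)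
          else if action == "toggle" then pyIdxUpd a (x + y * 1000) (fun v => v + 2)
          else a) a) a) a
  a.foldl (· + ·) 0

-- ===== PORT B =====
def part2_alt (inp : List (String × Int × Int × Int × Int)) : Int :=
  let xs := PySem.List.sorted
    (PySem.Set.union (PySem.Set.ofList [(0 : Int), 1000])
      (PySem.Set.ofList (inp.flatMap (fun op =>
        [op.2.1, op.2.2.2.1 + 1].filter (fun v => decide (0 < v) && decide (v < 1000))))))
    (fun v => v) false
  let ys := PySem.List.sorted
    (PySem.Set.union (PySem.Set.ofList [(0 : Int), 1000])
      (PySem.Set.ofList (inp.flatMap (fun op =>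
        [op.2.2.1, op.2.2.2.2 + 1].filter (fun v => decide (0 < v) && decide (v < 1000))))))
    (fun v => v) false
  (xs.zip (PySem.List.slice xs (some 1) none)).foldl (fun total p =>
    let col := (inp.filter (fun op => decide (op.2.1 ≤ p.1) && decide (p.1 ≤ op.2.2.2.1))).map
      (fun op => (op.1, op.2.2.1, op.2.2.2.2))
    (ys.zip (PySem.List.slice ys (some 1) none)).foldl (fun total q =>
      let v := col.foldl (fun v c =>
        if c.2.1 ≤ q.1 ∧ q.1 ≤ c.2.2 then
          (if c.1 == "on" then v + 1
           else if c.1 == "off" then max (v - 1) 0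
           else if c.1 == "toggle" then v + 2
           else v)
        else v) 0
      total + (p.2 - p.1) * (q.2 - q.1) * v) total) 0

-- ===== PRECONDITION & SPEC =====
-- Pre_ admits every op that is empty (start past end in x or y: A touches no cell) or whose whole
-- rectangle lies on the 1000×1000 grid.  Excluded are inputs where a non-empty rectangle leaves the
-- grid: there A either raises IndexError (index ≥ 10^6 or < -10^6) or silently wraps a negative
-- index onto the opposite edge of the grid — a flat-array artefact no caller would specify, which
-- sometimes coincides with B's grid-clipped value and sometimes not (see the cited examples).
def Pre_part2 (inp : List (String × Int × Int × Int × Int)) : Prop :=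
  ∀ op ∈ inp, (op.2.2.2.1 < op.2.1 ∨ op.2.2.2.2 < op.2.2.1) ∨
    (0 ≤ op.2.1 ∧ op.2.2.2.1 ≤ 999 ∧ 0 ≤ op.2.2.1 ∧ op.2.2.2.2 ≤ 999)
instance (inp : List (String × Int × Int × Int × Int)) : Decidable (Pre_part2 inp) := by
  unfold Pre_part2; infer_instance

def pvWitness_part2 : (List (String × Int × Int × Int × Int)) :=
  [("toggle", 0, 0, 1, 1), ("off", 1, 1, 1, 1), ("on", 5, 3, 2, 900)]

def Spec_part2 (inp : List (String × Int × Int × Int × Int)) (out : Int) : Prop := out = part2_alt inp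
instance (inp : List (String × Int × Int × Int × Int)) (out : Int) : Decidable (Spec_part2 inp out) := by unfold Spec_part2; infer_instance

-- ===== CLAIM (what is proved, stated in full; the proofs are below) =====
def Claim_equal_part2 : Prop := ∀ (inp : List (String × Int × Int × Int × Int)), Dom_part2 inp → Pre_part2 inp → Spec_part2 inp (part2 inp)

-- ===== LEMMAS AND PROOFS =====

-- Pointwise model shared by both proofs: the brightness of one cell after all ops.
abbrev pvHit (op : String × Int × Int × Int × Int) (x y : Int) : Prop :=
  op.2.1 ≤ x ∧ x ≤ op.2.2.2.1 ∧ op.2.2.1 ≤ y ∧ y ≤ op.2.2.2.2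

def pvStep (action : String) (v : Int) : Int :=
  if action == "on" then v + 1
  else if action == "off" then max (v - 1) 0
  else if action == "toggle" then v + 2
  else v

def pvBright (inp : List (String × Int × Int × Int × Int)) (x y : Int) : Int :=
  inp.foldl (fun v op => if pvHit op x y then pvStep op.1 v else v) 0

-- ---- A side: the 10^6-cell array computes pvBright pointwise ----

def pvGet (a : Array Int) (j : Nat) : Int := a[j]?.getD 0

theorem size_pyIdxUpd (a : Array Int) (i : Int) (f : Int → Int) :
    (pyIdxUpd a i f).size = a.size := by
  unfold pyIdxUpd; dsimp only; split <;> split <;> simp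

theorem pvGet_pyIdxUpd (a : Array Int) (i : Int) (f : Int → Int)
    (h0 : 0 ≤ i) (h1 : i < a.size) (j : Nat) (hj : j < a.size) :
    pvGet (pyIdxUpd a i f) j = if (j : Int) = i then f (pvGet a j) else pvGet a j := by
  unfold pyIdxUpd; dsimp only
  have hi' : (if i < 0 then i + (a.size : Int) else i) = i := if_neg (by omega)
  simp only [hi']
  rw [dif_pos ⟨h0, by omega⟩]
  simp only [pvGet, Array.getElem?_set]
  by_cases hij : (j : Int) = i
  · have hji : i.toNat = j := by omega
    subst hji
    simp [hij, Array.getElem?_eq_getElem hj]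
  · have hji : ¬ (i.toNat = j) := by omega
    simp [hij, hji]

theorem foldl_size {β : Type} (l : List β) (g : Array Int → β → Array Int)
    (h : ∀ a b, (g a b).size = a.size) (a : Array Int) : (l.foldl g a).size = a.size := by
  induction l generalizing a with
  | nil => rfl
  | cons x t ih => rw [List.foldl_cons, ih, h]

theorem col_pvGet (f : Int → Int) (x' sy stop : Int) (a : Array Int) (ha : a.size = 1000000)
    (hb : sy < stop → 0 ≤ x' ∧ x' ≤ 999 ∧ 0 ≤ sy ∧ stop ≤ 1000) (j : Nat) (hj : j < 1000000) :
    pvGet ((PySem.List.pyRange sy stop 1).foldl (fun a y => pyIdxUpd a (x' + y * 1000) f) a) j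
      = if ((j % 1000 : Nat) : Int) = x' ∧ sy ≤ ((j / 1000 : Nat) : Int) ∧ ((j / 1000 : Nat) : Int) < stop
        then f (pvGet a j) else pvGet a j := by
  generalize hn : (stop - sy).toNat = n
  induction n generalizing sy a with
  | zero =>
    rw [PySem.List.pyRange_one_eq_nil (by omega), List.foldl_nil, if_neg (by omega)]
  | succ n ih =>
    have hlt : sy < stop := by omega
    obtain ⟨b1, b2, b3, b4⟩ := hb hlt
    rw [PySem.List.pyRange_one_cons hlt, List.foldl_cons,
      ih (sy + 1) _ (by rw [size_pyIdxUpd, ha]) (fun _ => ⟨b1, b2, by omega, b4⟩) (by omega),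
      pvGet_pyIdxUpd a (x' + sy * 1000) f (by omega) (by omega) j (by omega)]
    split_ifs <;> first | rfl | omega

theorem rect_pvGet (f : Int → Int) (sx xstop sy ystop : Int) (a : Array Int) (ha : a.size = 1000000)
    (hb : sx < xstop → sy < ystop → 0 ≤ sx ∧ xstop ≤ 1000 ∧ 0 ≤ sy ∧ ystop ≤ 1000)
    (j : Nat) (hj : j < 1000000) :
    pvGet ((PySem.List.pyRange sx xstop 1).foldl (fun a x =>
        (PySem.List.pyRange sy ystop 1).foldl (fun a y => pyIdxUpd a (x + y * 1000) f) a) a) j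
      = if sx ≤ ((j % 1000 : Nat) : Int) ∧ ((j % 1000 : Nat) : Int) < xstop
            ∧ sy ≤ ((j / 1000 : Nat) : Int) ∧ ((j / 1000 : Nat) : Int) < ystop
        then f (pvGet a j) else pvGet a j := by
  generalize hn : (xstop - sx).toNat = n
  induction n generalizing sx a with
  | zero =>
    rw [PySem.List.pyRange_one_eq_nil (a := sx) (b := xstop) (by omega), List.foldl_nil,
      if_neg (by omega)]
  | succ n ih =>
    have hlt : sx < xstop := by omega
    rw [PySem.List.pyRange_one_cons hlt, List.foldl_cons,
      ih (sx + 1) _ (by rw [foldl_size _ _ (fun a y => size_pyIdxUpd a _ f), ha])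
        (fun h1 h2 => by obtain ⟨c1, c2, c3, c4⟩ := hb hlt h2; exact ⟨by omega, c2, c3, c4⟩)
        (by omega),
      col_pvGet f sx sy ystop a ha
        (fun h2 => by obtain ⟨c1, c2, c3, c4⟩ := hb hlt h2; exact ⟨c1, by omega, c3, c4⟩) j hj]
    split_ifs <;> first | rfl | omega

theorem pyIdxUpd_id (a : Array Int) (idx : Int) : pyIdxUpd a idx (fun v => v) = a := by
  unfold pyIdxUpd; dsimp only; split <;> split <;> first | apply Array.set_getElem_self | rfl

theorem body_eq (action : String) (a : Array Int) (idx : Int) :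
    (if action == "on" then pyIdxUpd a idx (fun v => v + 1)
     else if action == "off" then pyIdxUpd a idx (fun v => max (v - 1) 0)
     else if action == "toggle" then pyIdxUpd a idx (fun v => v + 2)
     else a)
    = pyIdxUpd a idx (pvStep action) := by
  by_cases hon : action = "on"
  · subst hon; rfl
  · by_cases hoff : action = "off"
    · subst hoff; rfl
    · by_cases htog : action = "toggle"
      · subst htog; rfl
      · have hs : pvStep action = fun v => v := by
          funext v; simp [pvStep, hon, hoff, htog]
        rw [hs, pyIdxUpd_id]
        simp [hon, hoff, htog]

theorem op_pvGet (action : String) (sx sy ex ey : Int)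
    (hop : (ex < sx ∨ ey < sy) ∨ (0 ≤ sx ∧ ex ≤ 999 ∧ 0 ≤ sy ∧ ey ≤ 999))
    (a : Array Int) (ha : a.size = 1000000) (j : Nat) (hj : j < 1000000) :
    pvGet ((PySem.List.pyRange sx (ex + 1) 1).foldl (fun a x =>
        (PySem.List.pyRange sy (ey + 1) 1).foldl (fun a y =>
          if action == "on" then pyIdxUpd a (x + y * 1000) (fun v => v + 1)
          else if action == "off" then pyIdxUpd a (x + y * 1000) (fun v => max (v - 1) 0)
          else if action == "toggle" then pyIdxUpd a (x + y * 1000) (fun v => v + 2)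
          else a) a) a) j
      = if pvHit (action, sx, sy, ex, ey) ((j % 1000 : Nat) : Int) ((j / 1000 : Nat) : Int)
        then pvStep action (pvGet a j) else pvGet a j := by
  simp only [body_eq]
  rw [rect_pvGet (pvStep action) sx (ex + 1) sy (ey + 1) a ha
    (fun h1 h2 => by
      rcases hop with h | h
      · omega
      · exact ⟨h.1, by omega, h.2.2.1, by omega⟩) j hj]
  simp only [pvHit]
  split_ifs <;> first | rfl | omega

theorem op_size (action : String) (sx sy ex ey : Int) (a : Array Int) :
    ((PySem.List.pyRange sx (ex + 1) 1).foldl (fun a x =>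
        (PySem.List.pyRange sy (ey + 1) 1).foldl (fun a y =>
          if action == "on" then pyIdxUpd a (x + y * 1000) (fun v => v + 1)
          else if action == "off" then pyIdxUpd a (x + y * 1000) (fun v => max (v - 1) 0)
          else if action == "toggle" then pyIdxUpd a (x + y * 1000) (fun v => v + 2)
          else a) a) a).size = a.size := by
  refine foldl_size _ _ (fun a x => foldl_size _ _ (fun a y => ?_) a) a
  simp only [body_eq, size_pyIdxUpd]

theorem ops_pvGet (inp : List (String × Int × Int × Int × Int)) (hpre : Pre_part2 inp)
    (a : Array Int) (ha : a.size = 1000000) (j : Nat) (hj : j < 1000000) :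
    pvGet (inp.foldl (fun a op =>
      match op with
      | (action, sx, sy, ex, ey) =>
        (PySem.List.pyRange sx (ex + 1) 1).foldl (fun a x =>
          (PySem.List.pyRange sy (ey + 1) 1).foldl (fun a y =>
            if action == "on" then pyIdxUpd a (x + y * 1000) (fun v => v + 1)
            else if action == "off" then pyIdxUpd a (x + y * 1000) (fun v => max (v - 1) 0)
            else if action == "toggle" then pyIdxUpd a (x + y * 1000) (fun v => v + 2)
            else a) a) a) a) j
    = inp.foldl (fun v op => if pvHit op ((j % 1000 : Nat) : Int) ((j / 1000 : Nat) : Int)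
        then pvStep op.1 v else v) (pvGet a j) := by
  induction inp generalizing a with
  | nil => rfl
  | cons op t ih =>
    obtain ⟨action, sx, sy, ex, ey⟩ := op
    have hop := hpre (action, sx, sy, ex, ey) (List.mem_cons_self)
    simp only at hop
    rw [List.foldl_cons, List.foldl_cons]
    dsimp only
    rw [ih (fun o ho => hpre o (List.mem_cons_of_mem _ ho)) _ (by rw [op_size, ha])]
    congr 1
    exact op_pvGet action sx sy ex ey hop a ha j hj

theorem sum_grid (g : Nat → Nat → Int) (n : Nat) :
    ∑ j ∈ Finset.range (1000 * n), g (j % 1000) (j / 1000)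
      = ∑ y ∈ Finset.range n, ∑ x ∈ Finset.range 1000, g x y := by
  induction n with
  | zero => simp
  | succ n ih =>
    rw [Nat.mul_succ, Finset.sum_range_add (fun j => g (j % 1000) (j / 1000)) (1000 * n) 1000, ih]
    have hc : ∀ i ∈ Finset.range 1000,
        g ((1000 * n + i) % 1000) ((1000 * n + i) / 1000) = g i n := by
      intro i hi
      have : i < 1000 := Finset.mem_range.mp hi
      congr 1 <;> omega
    rw [Finset.sum_congr rfl hc,
      Finset.sum_range_succ (fun y => ∑ x ∈ Finset.range 1000, g x y) n]

theorem sum_of_ptw (a : Array Int) (g : Nat → Nat → Int) (hsz : a.size = 1000000)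
    (h : ∀ j : Nat, j < 1000000 → pvGet a j = g (j % 1000) (j / 1000)) :
    a.foldl (· + ·) 0 = ∑ y ∈ Finset.range 1000, ∑ x ∈ Finset.range 1000, g x y := by
  have hlen : a.toList.length = 1000000 := by simp [hsz]
  have hterm : ∀ i : Fin a.toList.length, a.toList[i] = g ((i : Nat) % 1000) ((i : Nat) / 1000) := by
    intro i
    have hi : (i : Nat) < 1000000 := hlen ▸ i.isLt
    rw [← h i hi]
    simp [pvGet]
  calc a.foldl (· + ·) 0
      = a.toList.foldl (· + ·) 0 := (Array.foldl_toList _).symm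
    _ = a.toList.sum := by exact List.sum_eq_foldl.symm
    _ = ∑ i : Fin a.toList.length, a.toList[i] := (Fin.sum_univ_getElem _).symm
    _ = ∑ i : Fin a.toList.length, g ((i : Nat) % 1000) ((i : Nat) / 1000) :=
        Finset.sum_congr rfl (fun i _ => hterm i)
    _ = ∑ j ∈ Finset.range a.toList.length, g (j % 1000) (j / 1000) :=
        Fin.sum_univ_eq_sum_range (fun j => g (j % 1000) (j / 1000)) _
    _ = ∑ y ∈ Finset.range 1000, ∑ x ∈ Finset.range 1000, g x y := by
        rw [hlen]
        have := sum_grid g 1000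
        simpa using this

theorem A_eq_sum (inp : List (String × Int × Int × Int × Int)) (h : Pre_part2 inp) :
    part2 inp = ∑ y ∈ Finset.range 1000, ∑ x ∈ Finset.range 1000, pvBright inp (x : Int) (y : Int) := by
  unfold part2
  dsimp only
  refine sum_of_ptw _ (fun x y => pvBright inp (x : Int) (y : Int)) ?_ ?_
  · refine Eq.trans (foldl_size _ _ (fun a op => ?_) _) (by simp)
    obtain ⟨action, sx, sy, ex, ey⟩ := op
    exact op_size action sx sy ex ey a
  · intro j hj
    rw [ops_pvGet inp h _ (by simp) j hj]
    have h0 : pvGet (Array.replicate (1000 * 1000) 0) j = 0 := by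
      simp [pvGet, hj]
    rw [h0]
    rfl

-- ---- B side: coordinate compression computes the same double sum ----

def pvLx (inp : List (String × Int × Int × Int × Int)) : List Int :=
  inp.flatMap (fun op => [op.2.1, op.2.2.2.1 + 1].filter (fun v => decide (0 < v) && decide (v < 1000)))

def pvLy (inp : List (String × Int × Int × Int × Int)) : List Int :=
  inp.flatMap (fun op => [op.2.2.1, op.2.2.2.2 + 1].filter (fun v => decide (0 < v) && decide (v < 1000)))

def pvSortedB (l : List Int) : List Int :=
  PySem.List.sorted (PySem.Set.union (PySem.Set.ofList [(0 : Int), 1000]) (PySem.Set.ofList l))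
    (fun v => v) false

theorem sortedB_pairwise (l : List Int) : (pvSortedB l).Pairwise (· < ·) := by
  have hperm := PySem.List.sorted_perm
    (PySem.Set.union (PySem.Set.ofList [(0 : Int), 1000]) (PySem.Set.ofList l)) (fun v => v) false
  have hnd : (PySem.Set.union (PySem.Set.ofList [(0 : Int), 1000]) (PySem.Set.ofList l)).Nodup :=
    PySem.Set.nodup_union _ _ (PySem.Set.nodup_ofList _)
  have hnd2 : (pvSortedB l).Nodup := hperm.nodup_iff.mpr hnd
  have hle := PySem.List.sorted_pairwise
    (PySem.Set.union (PySem.Set.ofList [(0 : Int), 1000]) (PySem.Set.ofList l)) (fun v => v)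
  exact (hle.and hnd2).imp (fun h => lt_of_le_of_ne h.1 h.2)

theorem sortedB_mem (l : List Int) (v : Int) :
    v ∈ pvSortedB l ↔ (v = 0 ∨ v = 1000 ∨ v ∈ l) := by
  unfold pvSortedB
  rw [PySem.List.mem_sorted]
  simp [PySem.Set.mem_union, PySem.Set.mem_ofList, or_assoc]

theorem sortedB_ne (l : List Int) : pvSortedB l ≠ [] := by
  intro h
  have h0 : (0 : Int) ∈ pvSortedB l := (sortedB_mem l 0).mpr (Or.inl rfl)
  rw [h] at h0
  exact absurd h0 (List.not_mem_nil)

theorem mem_le_getLast : ∀ (xs : List Int) (hne : xs ≠ []), xs.Pairwise (· < ·) →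
    ∀ v ∈ xs, v ≤ xs.getLast hne := by
  intro xs
  induction xs with
  | nil => intro h; exact absurd rfl h
  | cons a t ih =>
    intro _ hp v hv
    by_cases ht : t = []
    · subst ht
      simp only [List.mem_singleton] at hv
      simp [hv]
    · rw [List.getLast_cons ht]
      rcases List.mem_cons.mp hv with rfl | hvt
      · exact le_of_lt ((List.pairwise_cons.mp hp).1 _ (List.getLast_mem ht))
      · exact ih ht (List.pairwise_cons.mp hp).2 v hvt

theorem sortedB_head (l : List Int) (hl : ∀ v ∈ l, 0 < v ∧ v < 1000) :
    (pvSortedB l).head (sortedB_ne l) = 0 := by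
  have h0 : (0 : Int) ∈ pvSortedB l := (sortedB_mem l 0).mpr (Or.inl rfl)
  have hpw := sortedB_pairwise l
  obtain ⟨a, t, hcons⟩ := List.exists_cons_of_ne_nil (sortedB_ne l)
  have hhead : (pvSortedB l).head (sortedB_ne l) = a := by simp [hcons]
  rw [hhead]
  rw [hcons] at h0 hpw
  have hmem : a ∈ pvSortedB l := by rw [hcons]; exact List.mem_cons_self
  have ha : a = 0 ∨ a = 1000 ∨ a ∈ l := (sortedB_mem l a).mp hmem
  rcases List.mem_cons.mp h0 with h | h
  · omega
  · have := (List.pairwise_cons.mp hpw).1 0 h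
    rcases ha with h | h | h
    · exact h
    · omega
    · have := hl a h
      omega

theorem sortedB_last (l : List Int) (hl : ∀ v ∈ l, 0 < v ∧ v < 1000) :
    (pvSortedB l).getLast (sortedB_ne l) = 1000 := by
  have h1000 : (1000 : Int) ∈ pvSortedB l := (sortedB_mem l 1000).mpr (Or.inr (Or.inl rfl))
  have hpw := sortedB_pairwise l
  have hge : 1000 ≤ (pvSortedB l).getLast (sortedB_ne l) :=
    mem_le_getLast _ (sortedB_ne l) hpw 1000 h1000
  have hlast := List.getLast_mem (sortedB_ne l)
  have := (sortedB_mem l _).mp hlast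
  rcases this with h | h | h
  · omega
  · exact h
  · have := hl _ h
    omega

theorem between (xs : List Int) (hp : xs.Pairwise (· < ·)) (p : Int × Int)
    (hpz : p ∈ xs.zip xs.tail) (v : Int) (hv : v ∈ xs) : v ≤ p.1 ∨ p.2 ≤ v := by
  obtain ⟨k, hk, hpk⟩ := List.mem_iff_getElem.mp hpz
  obtain ⟨i, hi, hvi⟩ := List.mem_iff_getElem.mp hv
  have hkl : k < xs.length - 1 := by
    simp only [List.length_zip, List.length_tail, lt_min_iff] at hk
    omega
  have h1 : xs[k]'(by omega) = p.1 := by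
    rw [← hpk]
    simp [List.getElem_zip]
  have h2 : xs[k + 1]'(by omega) = p.2 := by
    rw [← hpk]
    simp [List.getElem_zip, List.getElem_tail]
  have hmono := List.pairwise_iff_getElem.mp hp
  by_cases hik : i ≤ k
  · left
    rw [← h1, ← hvi]
    rcases eq_or_lt_of_le hik with rfl | hlt
    · exact le_refl _
    · exact le_of_lt (hmono i k hi (by omega) hlt)
  · right
    rw [← h2, ← hvi]
    rcases (by omega : k + 1 = i ∨ k + 1 < i) with rfl | hlt
    · exact le_refl _
    · exact le_of_lt (hmono (k + 1) i (by omega) hi hlt)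

theorem sum_intervals (g : Int → Int) : ∀ (t : List Int) (a : Int), (a :: t).Pairwise (· < ·) →
    (∀ p ∈ (a :: t).zip t, ∀ x : Int, p.1 ≤ x → x < p.2 → g x = g p.1) →
    (((a :: t).zip t).map (fun p => (p.2 - p.1) * g p.1)).sum
      = ∑ x ∈ Finset.Ico a ((a :: t).getLast (List.cons_ne_nil a t)), g x := by
  intro t
  induction t with
  | nil => intro a _ _; simp
  | cons b t ih =>
    intro a hp hc
    have hab : a < b := (List.pairwise_cons.mp hp).1 b (by simp)
    have hp' : (b :: t).Pairwise (· < ·) := (List.pairwise_cons.mp hp).2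
    have hble : b ≤ (b :: t).getLast (List.cons_ne_nil b t) :=
      mem_le_getLast _ _ hp' b (by simp)
    have hsplit : ∑ x ∈ Finset.Ico a ((b :: t).getLast (List.cons_ne_nil b t)), g x
        = ∑ x ∈ Finset.Ico a b, g x
          + ∑ x ∈ Finset.Ico b ((b :: t).getLast (List.cons_ne_nil b t)), g x := by
      rw [← Finset.Ico_union_Ico_eq_Ico (le_of_lt hab) hble,
        Finset.sum_union (Finset.Ico_disjoint_Ico_consecutive a b _)]
    rw [List.zip_cons_cons, List.map_cons, List.sum_cons,
      List.getLast_cons (List.cons_ne_nil b t),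
      ih b hp' (fun p hp x h1 h2 => hc p (List.mem_cons_of_mem _ hp) x h1 h2),
      hsplit]
    congr 1
    have hconst : ∀ x ∈ Finset.Ico a b, g x = g a := fun x hx => by
      have h := Finset.mem_Ico.mp hx
      exact hc (a, b) (by simp) x h.1 h.2
    rw [Finset.sum_congr rfl hconst, Finset.sum_const, Int.card_Ico, nsmul_eq_mul,
      Int.toNat_of_nonneg (by omega : (0 : Int) ≤ b - a)]

theorem bright_congr (inp : List (String × Int × Int × Int × Int)) (x y x' y' : Int)
    (h : ∀ op ∈ inp, pvHit op x y ↔ pvHit op x' y') :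
    pvBright inp x y = pvBright inp x' y' := by
  unfold pvBright
  refine PySem.List.foldl_congr_mem _ _ _ _ (fun acc op hop => ?_)
  by_cases hh : pvHit op x y
  · rw [if_pos hh, if_pos ((h op hop).mp hh)]
  · rw [if_neg hh, if_neg (fun hc => hh ((h op hop).mpr hc))]

theorem mem_pvLy (inp : List (String × Int × Int × Int × Int))
    (op : String × Int × Int × Int × Int) (hop : op ∈ inp) (v : Int)
    (hv : v = op.2.2.1 ∨ v = op.2.2.2.2 + 1) (h1 : 0 < v) (h2 : v < 1000) : v ∈ pvLy inp := by
  unfold pvLy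
  rw [List.mem_flatMap]
  refine ⟨op, hop, ?_⟩
  rcases hv with rfl | rfl <;> simp [h1, h2]

theorem mem_pvLx (inp : List (String × Int × Int × Int × Int))
    (op : String × Int × Int × Int × Int) (hop : op ∈ inp) (v : Int)
    (hv : v = op.2.1 ∨ v = op.2.2.2.1 + 1) (h1 : 0 < v) (h2 : v < 1000) : v ∈ pvLx inp := by
  unfold pvLx
  rw [List.mem_flatMap]
  refine ⟨op, hop, ?_⟩
  rcases hv with rfl | rfl <;> simp [h1, h2]

theorem pvLy_bounds (inp : List (String × Int × Int × Int × Int)) :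
    ∀ v ∈ pvLy inp, 0 < v ∧ v < 1000 := by
  intro v hv
  unfold pvLy at hv
  rw [List.mem_flatMap] at hv
  obtain ⟨op, _, hmem⟩ := hv
  have := List.of_mem_filter hmem
  simp at this
  omega

theorem pvLx_bounds (inp : List (String × Int × Int × Int × Int)) :
    ∀ v ∈ pvLx inp, 0 < v ∧ v < 1000 := by
  intro v hv
  unfold pvLx at hv
  rw [List.mem_flatMap] at hv
  obtain ⟨op, _, hmem⟩ := hv
  have := List.of_mem_filter hmem
  simp at this
  omega

theorem bright_const_y (inp : List (String × Int × Int × Int × Int)) (hpre : Pre_part2 inp)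
    (q : Int × Int) (hq : q ∈ (pvSortedB (pvLy inp)).zip (pvSortedB (pvLy inp)).tail)
    (x y : Int) (h1 : q.1 ≤ y) (h2 : y < q.2) :
    pvBright inp x y = pvBright inp x q.1 := by
  refine bright_congr _ _ _ _ _ (fun op hop => ?_)
  rcases hpre op hop with hemp | hgrid
  · unfold pvHit; omega
  · by_cases hse : op.2.2.1 ≤ op.2.2.2.2
    · have hs : op.2.2.1 ∈ pvSortedB (pvLy inp) := by
        rw [sortedB_mem]
        by_cases h0 : op.2.2.1 = 0
        · exact Or.inl h0
        · exact Or.inr (Or.inr (mem_pvLy inp op hop _ (Or.inl rfl) (by omega) (by omega)))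
      have he : op.2.2.2.2 + 1 ∈ pvSortedB (pvLy inp) := by
        rw [sortedB_mem]
        by_cases h0 : op.2.2.2.2 + 1 = 1000
        · exact Or.inr (Or.inl h0)
        · exact Or.inr (Or.inr (mem_pvLy inp op hop _ (Or.inr rfl) (by omega) (by omega)))
      have b1 := between _ (sortedB_pairwise (pvLy inp)) q hq _ hs
      have b2 := between _ (sortedB_pairwise (pvLy inp)) q hq _ he
      unfold pvHit; omega
    · unfold pvHit; omega

theorem bright_const_x (inp : List (String × Int × Int × Int × Int)) (hpre : Pre_part2 inp)
    (p : Int × Int) (hp : p ∈ (pvSortedB (pvLx inp)).zip (pvSortedB (pvLx inp)).tail)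
    (x y : Int) (h1 : p.1 ≤ x) (h2 : x < p.2) :
    pvBright inp x y = pvBright inp p.1 y := by
  refine bright_congr _ _ _ _ _ (fun op hop => ?_)
  rcases hpre op hop with hemp | hgrid
  · unfold pvHit; omega
  · by_cases hse : op.2.1 ≤ op.2.2.2.1
    · have hs : op.2.1 ∈ pvSortedB (pvLx inp) := by
        rw [sortedB_mem]
        by_cases h0 : op.2.1 = 0
        · exact Or.inl h0
        · exact Or.inr (Or.inr (mem_pvLx inp op hop _ (Or.inl rfl) (by omega) (by omega)))
      have he : op.2.2.2.1 + 1 ∈ pvSortedB (pvLx inp) := by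
        rw [sortedB_mem]
        by_cases h0 : op.2.2.2.1 + 1 = 1000
        · exact Or.inr (Or.inl h0)
        · exact Or.inr (Or.inr (mem_pvLx inp op hop _ (Or.inr rfl) (by omega) (by omega)))
      have b1 := between _ (sortedB_pairwise (pvLx inp)) p hp _ hs
      have b2 := between _ (sortedB_pairwise (pvLx inp)) p hp _ he
      unfold pvHit; omega
    · unfold pvHit; omega

theorem col_eq_bright (inp : List (String × Int × Int × Int × Int)) (x y : Int) :
    ((inp.filter (fun op => decide (op.2.1 ≤ x) && decide (x ≤ op.2.2.2.1))).map
      (fun op => (op.1, op.2.2.1, op.2.2.2.2))).foldl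
      (fun v c => if c.2.1 ≤ y ∧ y ≤ c.2.2 then
        (if c.1 == "on" then v + 1
         else if c.1 == "off" then max (v - 1) 0
         else if c.1 == "toggle" then v + 2
         else v) else v) 0
    = pvBright inp x y := by
  unfold pvBright
  suffices h : ∀ (l : List (String × Int × Int × Int × Int)) (v0 : Int),
      ((l.filter (fun op => decide (op.2.1 ≤ x) && decide (x ≤ op.2.2.2.1))).map
        (fun op => (op.1, op.2.2.1, op.2.2.2.2))).foldl
        (fun v c => if c.2.1 ≤ y ∧ y ≤ c.2.2 then
          (if c.1 == "on" then v + 1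
           else if c.1 == "off" then max (v - 1) 0
           else if c.1 == "toggle" then v + 2
           else v) else v) v0
      = l.foldl (fun v op => if pvHit op x y then pvStep op.1 v else v) v0 from h inp 0
  intro l
  induction l with
  | nil => intro v0; rfl
  | cons op t ih =>
    intro v0
    by_cases hx : (decide (op.2.1 ≤ x) && decide (x ≤ op.2.2.2.1)) = true
    · have hf : (op :: t).filter (fun op => decide (op.2.1 ≤ x) && decide (x ≤ op.2.2.2.1))
          = op :: t.filter (fun op => decide (op.2.1 ≤ x) && decide (x ≤ op.2.2.2.1)) := by
        simp [hx]
      rw [hf, List.map_cons, List.foldl_cons, List.foldl_cons, ih]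
      congr 1
      simp only [Bool.and_eq_true, decide_eq_true_eq] at hx
      have hiff : (op.2.2.1 ≤ y ∧ y ≤ op.2.2.2.2) ↔ pvHit op x y := by
        unfold pvHit
        constructor
        · intro h; exact ⟨hx.1, hx.2, h.1, h.2⟩
        · intro h; exact ⟨h.2.2.1, h.2.2.2⟩
      rw [if_congr hiff rfl rfl]
      rcases Classical.em (pvHit op x y) with h | h
      · rw [if_pos h, if_pos h]; rfl
      · rw [if_neg h, if_neg h]
    · have hf : (op :: t).filter (fun op => decide (op.2.1 ≤ x) && decide (x ≤ op.2.2.2.1))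
          = t.filter (fun op => decide (op.2.1 ≤ x) && decide (x ≤ op.2.2.2.1)) := by
        simp only [List.filter_cons, if_neg hx]
      rw [hf, List.foldl_cons, ih]
      congr 1
      simp only [Bool.and_eq_true, decide_eq_true_eq, not_and_or] at hx
      rw [if_neg (fun hc => by unfold pvHit at hc; omega)]

theorem sum_Ico_int (n : Nat) (f : Int → Int) :
    ∑ x ∈ Finset.Ico (0 : Int) (n : Int), f x = ∑ k ∈ Finset.range n, f (k : Int) := by
  induction n with
  | zero => simp
  | succ n ih =>
    have hins : Finset.Ico (0 : Int) ((n : Int) + 1) = insert (n : Int) (Finset.Ico (0 : Int) (n : Int)) := by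
      ext z
      simp only [Finset.mem_Ico, Finset.mem_insert]
      omega
    push_cast
    rw [hins, Finset.sum_insert (by simp), ih, Finset.sum_range_succ]
    ring

theorem sum_Ico_int' (f : Int → Int) :
    ∑ x ∈ Finset.Ico (0 : Int) 1000, f x = ∑ k ∈ Finset.range 1000, f (k : Int) := by
  simpa using sum_Ico_int 1000 f

theorem B_eq_sum (inp : List (String × Int × Int × Int × Int)) (h : Pre_part2 inp) :
    part2_alt inp = ∑ y ∈ Finset.range 1000, ∑ x ∈ Finset.range 1000, pvBright inp (x : Int) (y : Int) := by
  have hB : part2_alt inp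
      = ((pvSortedB (pvLx inp)).zip (pvSortedB (pvLx inp)).tail).foldl (fun total p =>
          ((pvSortedB (pvLy inp)).zip (pvSortedB (pvLy inp)).tail).foldl (fun total q =>
            total + (p.2 - p.1) * (q.2 - q.1) *
              (((inp.filter (fun op => decide (op.2.1 ≤ p.1) && decide (p.1 ≤ op.2.2.2.1))).map
                (fun op => (op.1, op.2.2.1, op.2.2.2.2))).foldl
                (fun v c => if c.2.1 ≤ q.1 ∧ q.1 ≤ c.2.2 then
                  (if c.1 == "on" then v + 1
                   else if c.1 == "off" then max (v - 1) 0
                   else if c.1 == "toggle" then v + 2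
                   else v) else v) 0)) total) 0 := by
    unfold part2_alt pvSortedB pvLx pvLy
    simp only [PySem.List.slice_from_one]
  rw [hB]
  simp only [PySem.List.foldl_add, zero_add, col_eq_bright]
  have hgl : ∀ (l l' : List Int) (hh : l ≠ []) (hh' : l' ≠ []), l = l' →
      l.getLast hh = l'.getLast hh' := fun l l' hh hh' he => by subst he; rfl
  obtain ⟨tx, htx⟩ : ∃ t, pvSortedB (pvLx inp) = 0 :: t := by
    refine ⟨(pvSortedB (pvLx inp)).tail, ?_⟩
    have hh := List.cons_head_tail (sortedB_ne (pvLx inp))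
    rw [sortedB_head _ (pvLx_bounds inp)] at hh
    exact hh.symm
  obtain ⟨ty, hty⟩ : ∃ t, pvSortedB (pvLy inp) = 0 :: t := by
    refine ⟨(pvSortedB (pvLy inp)).tail, ?_⟩
    have hh := List.cons_head_tail (sortedB_ne (pvLy inp))
    rw [sortedB_head _ (pvLy_bounds inp)] at hh
    exact hh.symm
  have hxpw : ((0 : Int) :: tx).Pairwise (· < ·) := htx ▸ sortedB_pairwise (pvLx inp)
  have hypw : ((0 : Int) :: ty).Pairwise (· < ·) := hty ▸ sortedB_pairwise (pvLy inp)
  have hxlast : ((0 : Int) :: tx).getLast (List.cons_ne_nil _ _) = 1000 := by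
    rw [hgl _ _ _ (sortedB_ne (pvLx inp)) htx.symm]
    exact sortedB_last _ (pvLx_bounds inp)
  have hylast : ((0 : Int) :: ty).getLast (List.cons_ne_nil _ _) = 1000 := by
    rw [hgl _ _ _ (sortedB_ne (pvLy inp)) hty.symm]
    exact sortedB_last _ (pvLy_bounds inp)
  rw [htx, hty]
  simp only [List.tail_cons]
  have hinner : ∀ x : Int,
      ((((0 : Int) :: ty).zip ty).map (fun q => (q.2 - q.1) * pvBright inp x q.1)).sum
      = ∑ y ∈ Finset.Ico (0 : Int) 1000, pvBright inp x y := by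
    intro x
    have hc : ∀ q ∈ ((0 : Int) :: ty).zip ty, ∀ z : Int, q.1 ≤ z → z < q.2 →
        pvBright inp x z = pvBright inp x q.1 := by
      intro q hq z h1 h2
      exact bright_const_y inp h q (by rw [hty, List.tail_cons]; exact hq) x z h1 h2
    have hs := sum_intervals (fun y => pvBright inp x y) ty 0 hypw hc
    rw [hylast] at hs
    exact hs
  simp only [mul_assoc]
  simp only [PySem.List.sum_map_const_mul_int]
  simp only [hinner]
  have hcx : ∀ p ∈ ((0 : Int) :: tx).zip tx, ∀ z : Int, p.1 ≤ z → z < p.2 →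
      (∑ y ∈ Finset.Ico (0 : Int) 1000, pvBright inp z y)
        = ∑ y ∈ Finset.Ico (0 : Int) 1000, pvBright inp p.1 y := by
    intro p hp z h1 h2
    refine Finset.sum_congr rfl (fun y _ => ?_)
    exact bright_const_x inp h p (by rw [htx, List.tail_cons]; exact hp) z y h1 h2
  have houter := sum_intervals (fun x => ∑ y ∈ Finset.Ico (0 : Int) 1000, pvBright inp x y)
    tx 0 hxpw hcx
  rw [hxlast] at houter
  rw [houter, Finset.sum_comm, sum_Ico_int' (fun y => ∑ x ∈ Finset.Ico (0 : Int) 1000, pvBright inp x y)]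
  refine Finset.sum_congr rfl (fun k _ => ?_)
  exact sum_Ico_int' (fun x => pvBright inp x (k : Int))

-- ===== VERDICT (by name: the statement is the Claim_ definition above) =====
theorem part2_spec : Claim_equal_part2 := by
  intro inp _ hpre
  unfold Spec_part2
  rw [A_eq_sum inp hpre, B_eq_sum inp hpre]
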